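-- pv_equiv track=rewrite | github.com/zi007lin/tezos-ico-password-recovery-v2 | src/functions.py | component_mixer
-- ===== SOURCE A (Python) =====
-- import itertools
--
-- def component_mixer(
--     parts, min_char_num, max_char_num, candidate_count, candidate_used, window, pwd_list
-- ):
--
--     for subset in itertools.product(*parts):
--
--         pwd_candidate = ""
--         candidate_count += 1
--         for x in subset:
--             pwd_candidate = pwd_candidate + x
--         if len(pwd_candidate) < min_char_num or len(pwd_candidate) > max_char_num:
--             continue
--
--         candidate_used += 1
--         pwd_list.append(pwd_candidate)
--         # window.ui.lcdNumber_used.display(candidate_used)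
--         # window.ui.lcdNumber.display(candidate_count)
--
--     return candidate_count, candidate_used, pwd_list
-- ===== SOURCE B (Python) =====
-- def component_mixer(
--     parts, min_char_num, max_char_num, candidate_count, candidate_used, window, pwd_list
-- ):
--     # Closed-form candidate count (product of part sizes) plus a pruned DFS that
--     # only descends into subtrees that can still produce a length in range.
--     total = 1
--     for p in parts:
--         total *= len(p)
--     kept = []
--     if total:
--         n = len(parts)
--         mins = [0] * (n + 1)
--         maxs = [0] * (n + 1)
--         for i in range(n - 1, -1, -1):
--             lens = [len(x) for x in parts[i]]
--             mins[i] = mins[i + 1] + min(lens)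
--             maxs[i] = maxs[i + 1] + max(lens)
--
--         def dfs(i, prefix):
--             if len(prefix) + maxs[i] < min_char_num or len(prefix) + mins[i] > max_char_num:
--                 return
--             if i == n:
--                 kept.append(prefix)
--                 return
--             for x in parts[i]:
--                 dfs(i + 1, prefix + x)
--
--         dfs(0, "")
--     candidate_count += total
--     candidate_used += len(kept)
--     pwd_list.extend(kept)
--     return candidate_count, candidate_used, pwd_list
-- ===== Notes on version B (the rewrite author's own statement) =====
-- stated objective: alternative
-- what changed: B never enumerates the full cartesian product: candidate_count comes from the closed-form product of the part sizes, and the kept passwords are produced by a depth-first search with branch-and-bound pruning on precomputed per-suffix minimal/maximal completion lengths, skipping whole subtrees whose completions cannot reach a length inside [min_char_num, max_char_num].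
import Mathlib
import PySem

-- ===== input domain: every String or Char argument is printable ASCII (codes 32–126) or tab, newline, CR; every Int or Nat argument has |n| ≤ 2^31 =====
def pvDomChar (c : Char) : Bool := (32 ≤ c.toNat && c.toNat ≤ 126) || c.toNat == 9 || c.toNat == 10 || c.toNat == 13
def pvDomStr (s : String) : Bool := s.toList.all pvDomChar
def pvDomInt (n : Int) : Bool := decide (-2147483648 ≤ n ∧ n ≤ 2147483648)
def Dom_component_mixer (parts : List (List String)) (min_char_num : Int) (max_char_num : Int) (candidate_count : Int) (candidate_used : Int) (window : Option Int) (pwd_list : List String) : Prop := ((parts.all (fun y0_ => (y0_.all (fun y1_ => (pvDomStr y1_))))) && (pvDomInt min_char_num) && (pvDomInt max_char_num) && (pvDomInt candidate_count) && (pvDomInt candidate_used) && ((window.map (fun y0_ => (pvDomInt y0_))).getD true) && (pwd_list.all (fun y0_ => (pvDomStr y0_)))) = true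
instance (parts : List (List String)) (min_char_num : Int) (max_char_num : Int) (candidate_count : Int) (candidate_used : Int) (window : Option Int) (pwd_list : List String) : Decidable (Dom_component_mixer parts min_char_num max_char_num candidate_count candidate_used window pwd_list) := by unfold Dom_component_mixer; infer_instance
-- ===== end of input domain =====

-- B derives candidate_count from a closed-form product of the part sizes and generates the kept
-- passwords by a DFS that prunes subtrees whose completion lengths cannot land in range (objective:
-- alternative; same worst-case cost). Return-value equivalence only — both Pythons mutate pwd_list in place.


-- ===== PORT A =====
-- itertools.product(*parts): leftmost factor varies slowest
def pyProd : List (List String) → List (List String)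
  | [] => [[]]
  | p :: ps => p.flatMap (fun x => (pyProd ps).map (x :: ·))

def component_mixer (parts : List (List String)) (min_char_num : Int) (max_char_num : Int) (candidate_count : Int) (candidate_used : Int) (window : Option Int) (pwd_list : List String) : Int × Int × List String :=
  (pyProd parts).foldl
    (fun (st : Int × Int × List String) subset =>
      let candidate_count := st.1 + 1
      let pwd_candidate := subset.foldl (fun acc x => acc ++ x) ""
      if PySem.Str.len pwd_candidate < min_char_num ∨ PySem.Str.len pwd_candidate > max_char_num then
        (candidate_count, st.2.1, st.2.2)
      else
        (candidate_count, st.2.1 + 1, st.2.2 ++ [pwd_candidate]))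
    (candidate_count, candidate_used, pwd_list)

-- ===== PORT B =====
-- mins[i] / maxs[i] of Source B, as functions of the remaining suffix of parts
def minsLen (ps : List (List String)) : Int :=
  ps.foldr (fun p acc => ((p.map PySem.Str.len).min?.getD 0) + acc) 0
def maxsLen (ps : List (List String)) : Int :=
  ps.foldr (fun p acc => ((p.map PySem.Str.len).max?.getD 0) + acc) 0

-- dfs(i, prefix) of Source B: recursion on the remaining parts, pruning a subtree whose
-- completions cannot reach a length inside [mn, mx]
def dfsB (mn mx : Int) : List (List String) → String → List String
  | ps, pre =>
    if PySem.Str.len pre + maxsLen ps < mn ∨ PySem.Str.len pre + minsLen ps > mx then []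
    else
      match ps with
      | [] => [pre]
      | p :: rest => p.flatMap (fun x => dfsB mn mx rest (pre ++ x))

def component_mixer_alt (parts : List (List String)) (min_char_num : Int) (max_char_num : Int) (candidate_count : Int) (candidate_used : Int) (window : Option Int) (pwd_list : List String) : Int × Int × List String :=
  let total : Int := parts.foldl (fun t p => t * (p.length : Int)) 1
  let kept : List String := if total ≠ 0 then dfsB min_char_num max_char_num parts "" else []
  (candidate_count + total, candidate_used + kept.length, pwd_list ++ kept)

-- ===== PRECONDITION & SPEC =====
def Spec_component_mixer (parts : List (List String)) (min_char_num : Int) (max_char_num : Int) (candidate_count : Int) (candidate_used : Int) (window : Option Int) (pwd_list : List String) (out : Int × Int × List String) : Prop := out = component_mixer_alt parts min_char_num max_char_num candidate_count candidate_used window pwd_list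
instance (parts : List (List String)) (min_char_num : Int) (max_char_num : Int) (candidate_count : Int) (candidate_used : Int) (window : Option Int) (pwd_list : List String) (out : Int × Int × List String) : Decidable (Spec_component_mixer parts min_char_num max_char_num candidate_count candidate_used window pwd_list out) := by unfold Spec_component_mixer; infer_instance

-- ===== CLAIM =====
def Claim_equal_component_mixer : Prop := ∀ (parts : List (List String)) (min_char_num : Int) (max_char_num : Int) (candidate_count : Int) (candidate_used : Int) (window : Option Int) (pwd_list : List String), Dom_component_mixer parts min_char_num max_char_num candidate_count candidate_used window pwd_list → Spec_component_mixer parts min_char_num max_char_num candidate_count candidate_used window pwd_list (component_mixer parts min_char_num max_char_num candidate_count candidate_used window pwd_list)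

-- ===== LEMMAS AND PROOFS =====

-- folding ++ from an arbitrary accumulator
theorem strJoin_foldl_init (sub : List String) (a : String) :
    sub.foldl (fun acc x => acc ++ x) a = a ++ sub.foldl (fun acc x => acc ++ x) "" := by
  induction sub generalizing a with
  | nil => simp
  | cons x sub ih =>
    simp only [List.foldl_cons]
    rw [ih (a ++ x), ih ("" ++ x)]
    simp [String.append_assoc]

-- A's loop over any list of subsets, characterised by lengths and a filter
theorem loopA_eq (min' max' : Int) (L : List (List String)) (cc cu : Int) (pl : List String) :
    L.foldl
      (fun (st : Int × Int × List String) subset =>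
        let candidate_count := st.1 + 1
        let pwd_candidate := subset.foldl (fun acc x => acc ++ x) ""
        if PySem.Str.len pwd_candidate < min' ∨ PySem.Str.len pwd_candidate > max' then
          (candidate_count, st.2.1, st.2.2)
        else
          (candidate_count, st.2.1 + 1, st.2.2 ++ [pwd_candidate]))
      (cc, cu, pl)
      = (cc + L.length,
         cu + ((L.map (fun sub => sub.foldl (fun acc x => acc ++ x) "")).filter
                (fun c => decide (min' ≤ PySem.Str.len c ∧ PySem.Str.len c ≤ max'))).length,
         pl ++ (L.map (fun sub => sub.foldl (fun acc x => acc ++ x) "")).filter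
                (fun c => decide (min' ≤ PySem.Str.len c ∧ PySem.Str.len c ≤ max'))) := by
  induction L generalizing cc cu pl with
  | nil => simp
  | cons sub rest ih =>
    simp only [List.foldl_cons, List.map_cons, List.filter_cons]
    set j := sub.foldl (fun acc x => acc ++ x) "" with hj
    by_cases h : min' ≤ PySem.Str.len j ∧ PySem.Str.len j ≤ max'
    · have hnot : ¬ (PySem.Str.len j < min' ∨ PySem.Str.len j > max') := by omega
      rw [if_neg hnot, ih]
      simp only [decide_eq_true h, if_pos]
      refine Prod.ext (by simp only [List.length_cons]; push_cast; ring) (Prod.ext (by simp only [List.length_cons]; push_cast; ring) ?_)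
      simp
    · have hyes : PySem.Str.len j < min' ∨ PySem.Str.len j > max' := by omega
      rw [if_pos hyes, ih]
      have : decide (min' ≤ PySem.Str.len j ∧ PySem.Str.len j ≤ max') = false := by
        simpa using h
      rw [this]
      simp only [if_neg Bool.false_ne_true]
      refine Prod.ext (by simp only [List.length_cons]; push_cast; ring) (Prod.ext (by ring) rfl)

-- total = |pyProd parts|
theorem total_eq_length (parts : List (List String)) (t : Int) :
    parts.foldl (fun t p => t * (p.length : Int)) t = t * ((pyProd parts).length : Int) := by
  induction parts generalizing t with
  | nil => simp [pyProd]
  | cons p ps ih =>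
    simp only [List.foldl_cons, pyProd]
    rw [ih]
    simp [List.length_flatMap]
    ring

-- an empty part kills the whole product
theorem pyProd_eq_nil_of_mem_nil (parts : List (List String)) (h : [] ∈ parts) :
    pyProd parts = [] := by
  induction parts with
  | nil => cases h
  | cons p ps ih =>
    rcases List.mem_cons.mp h with h | h
    · simp [pyProd, h.symm]
    · simp [pyProd, ih h]

-- filter distributes over flatMap
theorem filter_flatMap_eq {α β : Type} (l : List α) (f : α → List β) (q : β → Bool) :
    (l.flatMap f).filter q = l.flatMap (fun x => (f x).filter q) := by
  induction l with
  | nil => simp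
  | cons x xs ih => simp [List.filter_append, ih]

-- every completion of a nonempty-parts suffix has joined length within [minsLen, maxsLen]
theorem join_len_bounds (ps : List (List String)) (hne : ∀ p ∈ ps, p ≠ [])
    (sub : List String) (hsub : sub ∈ pyProd ps) :
    minsLen ps ≤ PySem.Str.len (sub.foldl (fun acc x => acc ++ x) "") ∧
    PySem.Str.len (sub.foldl (fun acc x => acc ++ x) "") ≤ maxsLen ps := by
  induction ps generalizing sub with
  | nil =>
    simp [pyProd] at hsub
    subst hsub
    simp [minsLen, maxsLen, PySem.Str.len]
  | cons p rest ih =>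
    simp only [pyProd, List.mem_flatMap, List.mem_map] at hsub
    obtain ⟨x, hx, sub', hsub', rfl⟩ := hsub
    have hb := ih (fun q hq => hne q (List.mem_cons_of_mem _ hq)) sub' hsub'
    have hx_len : PySem.Str.len x ∈ p.map PySem.Str.len := List.mem_map_of_mem hx
    have hmin : (p.map PySem.Str.len).min?.getD 0 ≤ PySem.Str.len x := by
      obtain ⟨m, hm⟩ := Option.isSome_iff_exists.mp (List.isSome_min?_of_mem hx_len)
      rw [hm]
      rw [List.min?_eq_some_iff] at hm
      simpa using hm.2 _ hx_len
    have hmax : PySem.Str.len x ≤ (p.map PySem.Str.len).max?.getD 0 := by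
      obtain ⟨m, hm⟩ := Option.isSome_iff_exists.mp (List.isSome_max?_of_mem hx_len)
      rw [hm]
      rw [List.max?_eq_some_iff] at hm
      simpa using hm.2 _ hx_len
    rw [List.foldl_cons, strJoin_foldl_init]
    have hlen : PySem.Str.len (("" ++ x) ++ sub'.foldl (fun acc y => acc ++ y) "")
        = PySem.Str.len x + PySem.Str.len (sub'.foldl (fun acc y => acc ++ y) "") := by
      simp [PySem.Str.len]
    rw [hlen]
    simp only [minsLen, maxsLen, List.foldr_cons] at *
    constructor <;> omega

-- dfs equals the filtered, prefixed joins of the full product (when all parts are nonempty)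
theorem dfsB_eq (mn mx : Int) (ps : List (List String)) (hne : ∀ p ∈ ps, p ≠ [])
    (pre : String) :
    dfsB mn mx ps pre
      = ((pyProd ps).map (fun sub => pre ++ sub.foldl (fun acc x => acc ++ x) "")).filter
          (fun c => decide (mn ≤ PySem.Str.len c ∧ PySem.Str.len c ≤ mx)) := by
  induction ps generalizing pre with
  | nil =>
    unfold dfsB
    simp only [minsLen, maxsLen, List.foldr_nil, pyProd, List.map_cons, List.map_nil, add_zero]
    by_cases h1 : mn ≤ PySem.Str.len pre ∧ PySem.Str.len pre ≤ mx
    · rw [if_neg (by omega)]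
      have h1' : mn ≤ (pre.length : Int) ∧ (pre.length : Int) ≤ mx := by
        simpa using h1
      simp [List.filter, h1'.1, h1'.2]
    · rw [if_pos (by omega)]
      have h1' : ¬ (mn ≤ (pre.length : Int) ∧ (pre.length : Int) ≤ mx) := by
        simpa using h1
      rcases Decidable.not_and_iff_or_not.mp h1' with h2 | h2 <;> simp [List.filter, h2]
  | cons p rest ih =>
    unfold dfsB
    by_cases h : PySem.Str.len pre + maxsLen (p :: rest) < mn ∨
        PySem.Str.len pre + minsLen (p :: rest) > mx
    · rw [if_pos h]
      symm
      rw [List.filter_eq_nil_iff]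
      intro c hc
      simp only [List.mem_map] at hc
      obtain ⟨sub, hsub, rfl⟩ := hc
      have hb := join_len_bounds (p :: rest) hne sub hsub
      simp only [PySem.Str.len_append]
      simp only [decide_eq_true_eq, not_and, not_le]
      intro h1
      omega
    · rw [if_neg h]
      have hrest : ∀ q ∈ rest, q ≠ [] := fun q hq => hne q (List.mem_cons_of_mem _ hq)
      simp only [pyProd, List.map_flatMap, List.map_map]
      rw [filter_flatMap_eq]
      refine List.flatMap_congr ?_
      intro x hx
      rw [ih hrest (pre ++ x)]
      congr 1
      refine List.map_congr_left ?_
      intro sub _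
      simp only [Function.comp]
      rw [List.foldl_cons, strJoin_foldl_init sub ("" ++ x)]
      simp [String.append_assoc]

-- ===== VERDICT =====
theorem component_mixer_spec : Claim_equal_component_mixer := by
  intro parts mn mx cc cu window pl _
  show _ = _
  unfold component_mixer
  rw [loopA_eq mn mx]
  have htot : parts.foldl (fun t p => t * (p.length : Int)) 1 = ((pyProd parts).length : Int) := by
    rw [total_eq_length]; ring
  by_cases hz : parts.foldl (fun t p => t * (p.length : Int)) 1 = 0
  · have hnil : pyProd parts = [] := by
      rw [htot] at hz
      exact List.eq_nil_of_length_eq_zero (by exact_mod_cast hz)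
    simp [component_mixer_alt, hz, hnil]
  · have hne : ∀ p ∈ parts, p ≠ [] := by
      intro p hp hpe
      apply hz
      rw [htot, pyProd_eq_nil_of_mem_nil parts (hpe ▸ hp)]
      simp
    have halt : component_mixer_alt parts mn mx cc cu window pl
        = (cc + parts.foldl (fun t p => t * (p.length : Int)) 1,
           cu + ((dfsB mn mx parts "").length : Int), pl ++ dfsB mn mx parts "") := by
      simp only [component_mixer_alt]
      rw [if_pos hz]
    rw [halt, dfsB_eq mn mx parts hne "", htot]
    have hmap : (pyProd parts).map (fun sub => "" ++ sub.foldl (fun acc x => acc ++ x) "")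
        = (pyProd parts).map (fun sub => sub.foldl (fun acc x => acc ++ x) "") := by
      simp
    rw [hmap]
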